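-- pv_equiv track=rewrite | github.com/integral81/lottomap | lotto_utils.py | group_by_shop
-- ===== SOURCE A (Python) =====
-- def get_shop_key(item):
--     """Returns a tuple (name, address) for unique identification."""
--     return (item.get('n', '').strip(), item.get('a', '').strip())
--
-- def group_by_shop(data):
--     """Groups win records by shop (Name + Address)."""
--     groups = {}
--     for item in data:
--         key = get_shop_key(item)
--         if key not in groups:
--             groups[key] = []
--         groups[key].append(item)
--     return groups
-- ===== SOURCE B (Python) =====
-- def get_shop_key(item):
--     """Returns a tuple (name, address) for unique identification."""
--     return (item.get('n', '').strip(), item.get('a', '').strip())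
--
-- def group_by_shop(data):
--     """Groups win records by shop (Name + Address).
--
--     Two-pass alternative: first collect the distinct shop keys in first-seen
--     order, then build each group with one filter pass over the data."""
--     keys = dict.fromkeys(map(get_shop_key, data))
--     return {k: [item for item in data if get_shop_key(item) == k] for k in keys}
-- ===== Notes on version B (the rewrite author's own statement) =====
-- stated objective: alternative
-- what changed: A builds the groups in one pass with per-item dict membership/append; B first deduplicates the key sequence (dict.fromkeys) and then constructs each group by an independent filter pass over the data.
import Mathlib
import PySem

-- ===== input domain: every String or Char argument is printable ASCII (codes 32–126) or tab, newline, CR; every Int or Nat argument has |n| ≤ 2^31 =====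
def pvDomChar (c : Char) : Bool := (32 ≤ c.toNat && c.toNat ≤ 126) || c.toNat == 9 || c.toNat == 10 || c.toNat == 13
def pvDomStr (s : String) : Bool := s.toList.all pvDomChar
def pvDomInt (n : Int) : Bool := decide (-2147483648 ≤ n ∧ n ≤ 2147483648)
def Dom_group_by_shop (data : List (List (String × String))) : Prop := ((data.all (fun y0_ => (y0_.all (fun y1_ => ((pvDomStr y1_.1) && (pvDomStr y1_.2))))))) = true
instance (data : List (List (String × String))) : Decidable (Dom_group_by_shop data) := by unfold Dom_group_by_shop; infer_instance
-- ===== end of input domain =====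

-- B replaces A's one-pass dict accumulation by a dedup-keys-then-filter-per-key construction (alternative decomposition, not faster).

-- ===== PORT A =====
-- shared helper: get_shop_key (identical in Source A and Source B)
def get_shop_key (item : List (String × String)) : String × String :=
  (PySem.Str.strip ((PySem.Dict.mk item).getD "n" ""), PySem.Str.strip ((PySem.Dict.mk item).getD "a" ""))

def group_by_shop (data : List (List (String × String))) : List (String × String × List (List (String × String))) :=
  let groups := data.foldl (fun g item =>
    let key := get_shop_key item
    let g := if g.contains key then g else g.insert key ([] : List (List (String × String)))
    -- groups[key].append(item), key now present: d[key] = d.get(key, []) + [item]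
    g.modify key [] (fun l => l ++ [item])) PySem.Dict.empty
  -- the returned dict, as the association list of the type convention
  groups.items.map (fun p => (p.1.1, p.1.2, p.2))

-- ===== PORT B =====
def group_by_shop_alt (data : List (List (String × String))) : List (String × String × List (List (String × String))) :=
  let keys := PySem.List.dedup (data.map get_shop_key)   -- dict.fromkeys(map(get_shop_key, data))
  keys.map (fun k => (k.1, k.2, data.filter (fun item => get_shop_key item == k)))

-- ===== PRECONDITION & SPEC =====
def Spec_group_by_shop (data : List (List (String × String))) (out : List (String × String × List (List (String × String)))) : Prop := out = group_by_shop_alt data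
instance (data : List (List (String × String))) (out : List (String × String × List (List (String × String)))) : Decidable (Spec_group_by_shop data out) := by unfold Spec_group_by_shop; infer_instance

-- ===== CLAIM (what is proved, stated in full; the proofs are below) =====
def Claim_equal_group_by_shop : Prop := ∀ (data : List (List (String × String))), Dom_group_by_shop data → Spec_group_by_shop data (group_by_shop data)

-- ===== LEMMAS AND PROOFS =====

-- A's loop body equals a single Dict.modify (the insert-if-absent is absorbed).
theorem step_eq (g : PySem.Dict (String × String) (List (List (String × String)))) (item : List (String × String)) :
    (if g.contains (get_shop_key item) then g else g.insert (get_shop_key item) []).modify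
      (get_shop_key item) [] (fun l => l ++ [item])
    = g.modify (get_shop_key item) [] (fun l => l ++ [item]) := by
  set k := get_shop_key item
  by_cases h : g.contains k
  · simp [h]
  · simp only [h, if_false, Bool.false_eq_true]
    simp only [PySem.Dict.modify]
    rw [PySem.Dict.getD_insert_self, PySem.Dict.insert_insert_self,
        PySem.Dict.getD_of_not_contains g [] (by simpa using h)]

theorem group_by_shop_eq_alt (data : List (List (String × String))) :
    group_by_shop data = group_by_shop_alt data := by
  show ((data.foldl (fun g item =>
          let key := get_shop_key item
          let g := if g.contains key then g else g.insert key ([] : List (List (String × String)))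
          g.modify key [] (fun l => l ++ [item])) PySem.Dict.empty).items.map
        (fun p => (p.1.1, p.1.2, p.2)))
      = (PySem.List.dedup (data.map get_shop_key)).map
          (fun k => (k.1, k.2, data.filter (fun item => get_shop_key item == k)))
  have hfold : data.foldl (fun g item =>
      let key := get_shop_key item
      let g := if g.contains key then g else g.insert key ([] : List (List (String × String)))
      g.modify key [] (fun l => l ++ [item])) PySem.Dict.empty
    = data.foldl (fun g item => g.modify (get_shop_key item) [] (fun l => l ++ [item]))
        PySem.Dict.empty :=
    PySem.List.foldl_congr_mem data _ _ _ (fun g item _ => step_eq g item)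
  rw [hfold]
  set D := data.foldl (fun g item => g.modify (get_shop_key item) [] (fun l => l ++ [item]))
      PySem.Dict.empty with hD
  have hkeys : D.keys = PySem.Set.ofList (data.map get_shop_key) := by
    rw [hD, PySem.Dict.keys_foldl_modify_key data get_shop_key []
        (fun _ item l => l ++ [item]) PySem.Dict.empty]
    rfl
  have hnd : D.keys.Nodup := by
    rw [hkeys]; exact PySem.Set.nodup_ofList _
  have hget : ∀ k, D.getD k [] = data.filter (fun item => get_shop_key item == k) := by
    intro k
    have hm : D = (data.map (fun it => (get_shop_key it, it))).foldl
        (fun d p => d.modify p.1 [] (fun l => l ++ [p.2])) PySem.Dict.empty := by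
      rw [hD, List.foldl_map]
    rw [hm, PySem.Dict.getD_foldl_modify_append]
    simp [List.filter_map, List.map_map, Function.comp_def]
  rw [PySem.Dict.items_eq_map_keys D hnd [], hkeys]
  simp only [List.map_map, Function.comp_def, hget]
  simp [PySem.List.dedup]

-- ===== VERDICT (by name: the statement is the Claim_ definition above) =====
theorem group_by_shop_spec : Claim_equal_group_by_shop := by
  intro data _
  show group_by_shop data = group_by_shop_alt data
  exact group_by_shop_eq_alt data
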